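-- pv_equiv track=rewrite | github.com/zhangsensen/-0927 | sealed_strategies/v3.3_20251216/locked/scripts/ci_checks.py | _has_allowed_prefix
-- ===== SOURCE A (Python) =====
-- def _has_allowed_prefix(parts, prefix):
--     lowered_parts = tuple(part.lower() for part in parts)
--     lowered_prefix = tuple(part.lower() for part in prefix)
--     plen = len(lowered_prefix)
--     for idx in range(len(lowered_parts) - plen + 1):
--         if lowered_parts[idx : idx + plen] == lowered_prefix:
--             return True
--     return False
-- ===== SOURCE B (Python) =====
-- def _key(t):
--     total = len(t)
--     for ch in t:
--         total += ord(ch)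
--     return total
--
--
-- def _has_allowed_prefix(parts, prefix):
--     target = [t.lower() for t in prefix]
--     source = [t.lower() for t in parts]
--     m = len(target)
--     n = len(source)
--     if m > n:
--         return False
--     tsum = 0
--     for t in target:
--         tsum += _key(t)
--     wsum = 0
--     for t in source[:m]:
--         wsum += _key(t)
--     i = 0
--     while True:
--         if wsum == tsum and source[i:i + m] == target:
--             return True
--         if i + m >= n:
--             return False
--         wsum += _key(source[i + m]) - _key(source[i])
--         i += 1
-- ===== Notes on version B (the rewrite author's own statement) =====
-- stated objective: alternative
-- what changed: Replaces the slice-and-compare at every index with a sliding-window fingerprint (sum of a per-token key, updated in O(1) per shift); the full token-by-token comparison runs only when the fingerprints match.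
import Mathlib
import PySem

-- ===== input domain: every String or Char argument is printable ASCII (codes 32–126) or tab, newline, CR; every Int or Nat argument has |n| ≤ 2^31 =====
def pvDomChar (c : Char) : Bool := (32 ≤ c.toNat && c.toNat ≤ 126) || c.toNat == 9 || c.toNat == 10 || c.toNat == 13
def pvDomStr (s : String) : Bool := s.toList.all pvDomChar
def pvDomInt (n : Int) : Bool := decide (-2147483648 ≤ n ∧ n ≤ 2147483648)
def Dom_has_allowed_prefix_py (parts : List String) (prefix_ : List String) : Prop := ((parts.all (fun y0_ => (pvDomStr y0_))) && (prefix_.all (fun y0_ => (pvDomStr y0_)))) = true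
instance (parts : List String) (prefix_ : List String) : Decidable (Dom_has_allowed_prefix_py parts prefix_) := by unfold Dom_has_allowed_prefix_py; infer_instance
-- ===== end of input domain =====

-- B replaces A's slice-and-compare at every start index with a sliding-window
-- fingerprint (sum of a per-token key, updated in O(1) per shift); the token
-- comparison runs only when the fingerprints match.  Equivalence is proved on
-- all inputs (both programs are total).

-- ===== PORT A =====
def has_allowed_prefix_py (parts : List String) (prefix_ : List String) : Bool :=
  let lowered_parts := parts.map PySem.Str.lower
  let lowered_prefix := prefix_.map PySem.Str.lower
  let plen := lowered_prefix.length
  (PySem.List.pyRange 0 ((lowered_parts.length : Int) - (plen : Int) + 1) 1).any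
    (fun idx =>
      PySem.List.slice lowered_parts (some idx) (some (idx + (plen : Int))) == lowered_prefix)

-- ===== PORT B =====
-- _key(t) = len(t) + sum of ord(ch) for ch in t
def keyB (t : String) : Int :=
  t.toList.foldl (fun total ch => total + (ch.toNat : Int)) (t.toList.length : Int)

-- the `while True` loop of Source B; src[i+m] / src[i] are in range under the loop's
-- own guard (i + m < n), so getD is exact there
def scanB (src tgt : List String) (m : Nat) (tsum : Int) (i : Nat) (wsum : Int) : Bool :=
  if wsum = tsum ∧ (src.drop i).take m = tgt then true
  else if src.length ≤ i + m then false
  else scanB src tgt m tsum (i + 1) (wsum + (keyB (src.getD (i + m) "") - keyB (src.getD i "")))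
termination_by src.length - i
decreasing_by omega

def has_allowed_prefix_py_alt (parts : List String) (prefix_ : List String) : Bool :=
  let target := prefix_.map PySem.Str.lower
  let source := parts.map PySem.Str.lower
  let m := target.length
  let n := source.length
  if m > n then false
  else
    let tsum := (target.map keyB).sum
    let wsum := ((source.take m).map keyB).sum
    scanB source target m tsum 0 wsum

-- ===== PRECONDITION & SPEC =====
def Spec_has_allowed_prefix_py (parts : List String) (prefix_ : List String) (out : Bool) : Prop := out = has_allowed_prefix_py_alt parts prefix_
instance (parts : List String) (prefix_ : List String) (out : Bool) : Decidable (Spec_has_allowed_prefix_py parts prefix_ out) := by unfold Spec_has_allowed_prefix_py; infer_instance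

-- ===== CLAIM (what is proved, stated in full; the proofs are below) =====
def Claim_equal_has_allowed_prefix_py : Prop := ∀ (parts : List String) (prefix_ : List String), Dom_has_allowed_prefix_py parts prefix_ → Spec_has_allowed_prefix_py parts prefix_ (has_allowed_prefix_py parts prefix_)

-- ===== LEMMAS AND PROOFS =====

-- window sum at index i
def winSum (src : List String) (m i : Nat) : Int := (((src.drop i).take m).map keyB).sum

lemma winSum_eq_sum_range (src : List String) (m i : Nat) (hin : i + m <= src.length) :
    winSum src m i = ∑ j ∈ Finset.range m, keyB (src.getD (i + j) "") := by
  induction m with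
  | zero => simp [winSum]
  | succ k ih =>
      have hik : i + k ≤ src.length := by omega
      have hlt : i + k < src.length := by omega
      have hget : (src.drop i)[k]? = some src[i + k] := by
        rw [List.getElem?_drop]
        exact List.getElem?_eq_getElem hlt
      have : (src.drop i).take (k + 1) = (src.drop i).take k ++ [src[i + k]] := by
        rw [List.take_add_one, hget]; rfl
      rw [winSum, this, List.map_append, List.sum_append, Finset.sum_range_succ,
        ← winSum, ih hik]
      simp [List.getD, List.getElem?_eq_getElem hlt]

lemma winSum_step (src : List String) (m i : Nat) (h : i + m < src.length) :
    winSum src m (i + 1) =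
      winSum src m i + (keyB (src.getD (i + m) "") - keyB (src.getD i "")) := by
  rw [winSum_eq_sum_range src m (i+1) (by omega), winSum_eq_sum_range src m i (by omega)]
  have h1 := Finset.sum_range_succ (fun j => keyB (src.getD (i + j) "")) m
  have h2 := Finset.sum_range_succ' (fun j => keyB (src.getD (i + j) "")) m
  have h4 : ∑ j ∈ Finset.range m, keyB (src.getD (i + 1 + j) "") =
      ∑ j ∈ Finset.range m, keyB (src.getD (i + (j + 1)) "") :=
    Finset.sum_congr rfl (fun j _ => by rw [show i + 1 + j = i + (j + 1) by omega])
  simp only [Nat.add_zero] at h2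
  rw [h4]
  linarith [h1, h2]

lemma winSum_eq_tsum_of_window_eq (src tgt : List String) (m i : Nat)
    (hw : (src.drop i).take m = tgt) :
    winSum src m i = (tgt.map keyB).sum := by
  unfold winSum; rw [hw]

-- characterisation of the scan loop, given the fingerprint invariant
lemma scanB_iff_aux (src tgt : List String) (m : Nat) (hm : m = tgt.length) :
    ∀ (d i : Nat), src.length - i ≤ d → i + m ≤ src.length →
    (scanB src tgt m ((tgt.map keyB).sum) i (winSum src m i) = true ↔
      ∃ j, i ≤ j ∧ j + m ≤ src.length ∧ (src.drop j).take m = tgt) := by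
  intro d
  induction d with
  | zero =>
      intro i hd hin
      have hi : i = src.length ∧ m = 0 := by omega
      obtain ⟨hi, hm0⟩ := hi
      have htgt : tgt = [] := List.eq_nil_of_length_eq_zero (by omega)
      rw [scanB]
      have hcond : winSum src m i = (tgt.map keyB).sum ∧ (src.drop i).take m = tgt := by
        subst hm0 htgt; simp [winSum]
      rw [if_pos hcond]
      simp only [true_iff]
      exact ⟨i, le_refl _, hin, hcond.2⟩
  | succ d ih =>
      intro i hd hin
      rw [scanB]
      split_ifs with h1 h2
      · simp only [true_iff]
        exact ⟨i, le_refl _, hin, h1.2⟩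
      · -- i + m = src.length, no match at i, loop ends
        simp only [false_iff, not_exists]
        rintro j ⟨hj1, hj2, hj3⟩
        have hji : j = i := by omega
        rw [hji] at hj3
        exact h1 ⟨winSum_eq_tsum_of_window_eq src tgt m i hj3, hj3⟩
      · have hlt : i + m < src.length := by omega
        rw [← winSum_step src m i hlt]
        rw [ih (i + 1) (by omega) (by omega)]
        constructor
        · rintro ⟨j, hj1, hj2, hj3⟩
          exact ⟨j, by omega, hj2, hj3⟩
        · rintro ⟨j, hj1, hj2, hj3⟩
          rcases Nat.eq_or_lt_of_le hj1 with heq | hlt2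
          · exfalso; rw [← heq] at hj3
            exact h1 ⟨winSum_eq_tsum_of_window_eq src tgt m i hj3, hj3⟩
          · exact ⟨j, by omega, hj2, hj3⟩

-- characterisation of A's scan
lemma portA_iff (src tgt : List String) :
    ((PySem.List.pyRange 0 ((src.length : Int) - (tgt.length : Int) + 1) 1).any
      (fun idx =>
        PySem.List.slice src (some idx) (some (idx + (tgt.length : Int))) == tgt)) = true ↔
      ∃ j : Nat, j + tgt.length ≤ src.length ∧ (src.drop j).take tgt.length = tgt := by
  rw [List.any_eq_true]
  constructor
  · rintro ⟨idx, hmem, hp⟩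
    rw [PySem.List.mem_pyRange_one] at hmem
    obtain ⟨h0, hlt⟩ := hmem
    set j := idx.toNat with hj
    have hidx : idx = (j : Int) := (Int.toNat_of_nonneg h0).symm
    rw [hidx, PySem.List.slice_natCast_add, beq_iff_eq] at hp
    refine ⟨j, ?_, hp⟩
    rw [hidx] at hlt
    omega
  · rintro ⟨j, hle, hw⟩
    refine ⟨(j : Int), ?_, ?_⟩
    · rw [PySem.List.mem_pyRange_one]
      constructor
      · positivity
      · omega
    · rw [PySem.List.slice_natCast_add, beq_iff_eq]
      exact hw


-- ===== VERDICT (by name: the statement is the Claim_ definition above) =====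
theorem has_allowed_prefix_py_spec : Claim_equal_has_allowed_prefix_py := by
  intro parts prefix_ _
  unfold Spec_has_allowed_prefix_py has_allowed_prefix_py has_allowed_prefix_py_alt
  simp only []
  set src := parts.map PySem.Str.lower with hsrc
  set tgt := prefix_.map PySem.Str.lower with htgt
  rw [Bool.eq_iff_iff]
  rw [portA_iff src tgt]
  split_ifs with hgt
  · simp only [iff_false, not_exists]
    rintro j ⟨hj, _⟩
    omega
  · have hin : 0 + tgt.length ≤ src.length := by omega
    have hws : ((src.take tgt.length).map keyB).sum = winSum src tgt.length 0 := by
      simp [winSum]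
    rw [hws, scanB_iff_aux src tgt tgt.length rfl (src.length) 0 (by omega) hin]
    constructor
    · rintro ⟨j, hj1, hj2⟩; exact ⟨j, Nat.zero_le _, hj1, hj2⟩
    · rintro ⟨j, _, hj2, hj3⟩; exact ⟨j, hj2, hj3⟩
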